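-- pv_equiv track=rewrite | github.com/smohapatra1/scripting | python/practice/start_again/2024/07162024/bowling_pins.py | isWinning
-- ===== SOURCE A (Python) =====
-- g = {0:0,1:1,2:2}
--
-- def isWinning(n, config):
--     # Return WIN or LOSE depending on whether you will win
--     tot = 0
--     L = 0
--     config += "X"
--     for i in config:
--         if i == "I":
--             L+=1
--         else:
--             tot = tot^g[L]
--             L = 0
--     if tot != 0:
--         return "WIN"
--     return "LOSE"
-- ===== SOURCE B (Python) =====
-- g = {0: 0, 1: 1, 2: 2}
--
-- def isWinning(n, config):
--     # Tokenize into runs of "I" (non-"I" chars become separators), then XOR-reduce.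
--     tot = 0
--     for run in "".join(c if c == "I" else " " for c in config).split(" "):
--         tot ^= g[len(run)]
--     return "WIN" if tot != 0 else "LOSE"
-- ===== Notes on version B (the rewrite author's own statement) =====
-- stated objective: idiomatic
-- what changed: Replaces the char-by-char state machine (running tot/L with an appended sentinel) by tokenize-then-reduce: non-'I' chars become separators, split yields the runs, and a single XOR-fold over g[len(run)] gives the result.
import Mathlib
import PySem

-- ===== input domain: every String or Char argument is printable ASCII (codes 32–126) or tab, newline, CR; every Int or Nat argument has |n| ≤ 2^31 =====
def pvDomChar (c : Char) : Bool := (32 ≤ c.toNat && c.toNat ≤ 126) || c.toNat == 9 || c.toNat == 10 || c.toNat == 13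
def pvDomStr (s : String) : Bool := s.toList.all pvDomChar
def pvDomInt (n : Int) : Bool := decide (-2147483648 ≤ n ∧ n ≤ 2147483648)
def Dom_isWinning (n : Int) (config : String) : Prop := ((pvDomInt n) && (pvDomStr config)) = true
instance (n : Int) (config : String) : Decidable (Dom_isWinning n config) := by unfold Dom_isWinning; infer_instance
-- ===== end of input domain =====

-- B tokenizes into runs of 'I' and XOR-reduces instead of A's char-by-char state machine (objective: idiomatic).

-- ===== PORT A =====
-- g = {0:0,1:1,2:2}
def pvG : PySem.Dict Int Int := PySem.Dict.ofList [(0, 0), (1, 1), (2, 2)]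

-- A's loop over the characters with state (tot, L); none = KeyError on g[L]
def pvLoopA : List Char → Int → Int → Option (Int × Int)
  | [], tot, L => some (tot, L)
  | c :: rest, tot, L =>
    if c = 'I' then pvLoopA rest tot (L + 1)
    else
      match PySem.Dict.get? pvG L with
      | none => none
      | some v => pvLoopA rest (PySem.Int.bxor tot v) 0

def isWinning (_n : Int) (config : String) : String :=
  match pvLoopA (config.toList ++ ['X']) 0 0 with
  | some (tot, _) => if tot ≠ 0 then "WIN" else "LOSE"
  | none => "LOSE"   -- unreachable under Pre_: Python raises KeyError here

-- ===== PORT B =====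
-- B's XOR-fold over the run tokens; none = KeyError on g[len(run)]
def pvFoldB : List (List Char) → Int → Option Int
  | [], tot => some tot
  | t :: ts, tot =>
    match PySem.Dict.get? pvG (t.length : Int) with
    | none => none
    | some v => pvFoldB ts (PySem.Int.bxor tot v)

def isWinning_alt (_n : Int) (config : String) : String :=
  -- "".join(c if c == "I" else " " for c in config).split(" ")  →  map then splitOn ' '
  match pvFoldB ((config.toList.map (fun c => if c = 'I' then c else ' ')).splitOn ' ') 0 with
  | some tot => if tot ≠ 0 then "WIN" else "LOSE"
  | none => "LOSE"   -- unreachable under Pre_: Python raises KeyError here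

-- ===== PRECONDITION & SPEC =====
-- Pre_ excludes exactly the configs containing a run of three 'I's, on which the Python A
-- (and B alike) raises KeyError via g[L] with L ≥ 3.
def Pre_isWinning (_n : Int) (config : String) : Prop :=
  ¬ ['I', 'I', 'I'] <:+: config.toList

instance (n : Int) (config : String) : Decidable (Pre_isWinning n config) := by
  unfold Pre_isWinning; infer_instance

def pvWitness_isWinning : Int × String := (0, "II X.I")

def Spec_isWinning (n : Int) (config : String) (out : String) : Prop := out = isWinning_alt n config
instance (n : Int) (config : String) (out : String) : Decidable (Spec_isWinning n config out) := by unfold Spec_isWinning; infer_instance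

-- ===== CLAIM (what is proved, stated in full; the proofs are below) =====
def Claim_equal_isWinning : Prop := ∀ (n : Int) (config : String), Dom_isWinning n config → Pre_isWinning n config → Spec_isWinning n config (isWinning n config)

-- ===== LEMMAS AND PROOFS =====

-- A's state machine run on cs (with the sentinel) equals B's fold over the split tokens,
-- where the pending run length k is prepended to the first token.
theorem pvKey (cs : List Char) (tot : Int) (k : Nat) :
    pvLoopA (cs ++ ['X']) tot (k : Int) =
      (match (cs.map (fun c => if c = 'I' then c else ' ')).splitOn ' ' with
       | [] => some (tot, 0)
       | t :: ts =>
         match PySem.Dict.get? pvG ((k + t.length : Nat) : Int) with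
         | none => none
         | some v => (pvFoldB ts (PySem.Int.bxor tot v)).map (fun r => (r, 0))) := by
  induction cs generalizing tot k with
  | nil =>
    simp [pvLoopA, List.splitOn, List.splitOnP_nil]
    cases h : PySem.Dict.get? pvG (k : Int) <;> simp [h, pvLoopA, pvFoldB]
  | cons c rest ih =>
    by_cases hc : c = 'I'
    · subst hc
      have : ((k : Int) + 1) = ((k + 1 : Nat) : Int) := by push_cast; ring
      simp only [List.cons_append, pvLoopA, if_pos rfl, this, ih, List.map_cons, if_pos rfl,
        List.splitOn, List.splitOnP_cons]
      have hne := List.splitOnP_ne_nil (fun x => x == ' ') (rest.map (fun c => if c = 'I' then c else ' '))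
      cases hsp : List.splitOnP (fun x => x == ' ') (rest.map (fun c => if c = 'I' then c else ' ')) with
      | nil => exact absurd hsp hne
      | cons t ts =>
        simp [hsp, List.modifyHead]
        congr 2
        omega
    · have hX : c ≠ 'I' := hc
      simp only [List.cons_append, pvLoopA, if_neg hX, List.map_cons, if_neg hX,
        List.splitOn, List.splitOnP_cons]
      norm_num
      cases h : PySem.Dict.get? pvG (k : Int) with
      | none => simp [h]
      | some v =>
        simp only [h]
        have h0 := ih (PySem.Int.bxor tot v) 0
        simp only [Nat.cast_zero] at h0
        rw [h0]
        have hne := List.splitOnP_ne_nil (fun x => x == ' ') (rest.map (fun c => if c = 'I' then c else ' '))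
        cases hsp : List.splitOnP (fun x => x == ' ') (rest.map (fun c => if c = 'I' then c else ' ')) with
        | nil => exact absurd hsp hne
        | cons t ts =>
          simp only [hsp, List.splitOn, List.length_nil, Nat.add_zero, pvFoldB, h]
          cases h3 : PySem.Dict.get? pvG ((t.length : Nat) : Int) <;> simp [h3]

-- ===== VERDICT (by name: the statement is the Claim_ definition above) =====
theorem isWinning_spec : Claim_equal_isWinning := by
  intro n config _ _
  unfold Spec_isWinning isWinning isWinning_alt
  have h := pvKey config.toList 0 0
  simp only [Nat.cast_zero] at h
  rw [h]
  have hne := List.splitOnP_ne_nil (fun x => x == ' ') (config.toList.map (fun c => if c = 'I' then c else ' '))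
  cases hsp : List.splitOnP (fun x => x == ' ') (config.toList.map (fun c => if c = 'I' then c else ' ')) with
  | nil => exact absurd hsp hne
  | cons t ts =>
    simp only [List.splitOn, hsp, Nat.zero_add, pvFoldB]
    cases h2 : PySem.Dict.get? pvG ((t.length : Nat) : Int) with
    | none => rfl
    | some v =>
      simp only [h2]
      cases pvFoldB ts (PySem.Int.bxor 0 v) <;> rfl
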